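-- pv_equiv track=rewrite | github.com/gianlucapostigo/Leetcode | sorted_square_easy.py | sorted_squared2
-- ===== SOURCE A (Python) =====
-- def sorted_squared2(array):
--     n = len(array)
--     left, right = 0, n - 1
--     res = [0]*n
--     for i in reversed(range(n)):
--         if array[left]**2 > array[right]**2:
--             res[i] = array[left]**2
--             left += 1
--         else:
--             res[i] = array[right]**2
--             right -= 1
--     return res
-- ===== SOURCE B (Python) =====
-- def sorted_squared2(array):
--     return sorted(x * x for x in array)
-- ===== Notes on version B (the rewrite author's own statement) =====
-- stated objective: simpler
-- what changed: Replaces the index-based two-pointer back-to-front fill with a one-line square-then-sort; no index arithmetic or preallocated result list.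
-- outside the precondition, e.g. on sorted_squared2([1, 3, 2]): A returns [1, 9, 4], B returns [1, 4, 9]
import Mathlib
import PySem

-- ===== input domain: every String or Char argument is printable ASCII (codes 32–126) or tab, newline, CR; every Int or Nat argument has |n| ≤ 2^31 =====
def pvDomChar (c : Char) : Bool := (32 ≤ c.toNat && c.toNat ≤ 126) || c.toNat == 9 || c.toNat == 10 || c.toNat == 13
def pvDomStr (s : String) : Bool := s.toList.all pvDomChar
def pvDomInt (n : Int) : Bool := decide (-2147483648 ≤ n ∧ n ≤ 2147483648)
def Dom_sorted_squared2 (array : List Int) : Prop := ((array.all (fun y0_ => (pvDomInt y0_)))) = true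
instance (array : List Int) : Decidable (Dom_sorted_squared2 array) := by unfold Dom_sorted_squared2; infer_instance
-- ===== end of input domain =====

-- B replaces A's index-based two-pointer back-to-front fill with a plain square-then-sort;
-- equivalence is claimed on sorted (non-decreasing) input, the problem's stated precondition.


-- ===== PORT A =====
-- loop body of A: compare squares at the two ends, write the larger into res[i], move that pointer
def pvStepA (array : List Int) (st : Int × Int × List Int) (i : Nat) : Int × Int × List Int :=
  match st with
  | (left, right, res) =>
    if PySem.List.pyGetD array left 0 ^ 2 > PySem.List.pyGetD array right 0 ^ 2 then
      (left + 1, right, res.set i (PySem.List.pyGetD array left 0 ^ 2))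
    else
      (left, right - 1, res.set i (PySem.List.pyGetD array right 0 ^ 2))

def sorted_squared2 (array : List Int) : List Int :=
  let n := array.length
  (((List.range n).reverse).foldl (pvStepA array) ((0 : Int), (n : Int) - 1, List.replicate n (0 : Int))).2.2

-- ===== PORT B =====
def sorted_squared2_alt (array : List Int) : List Int :=
  PySem.List.sorted (array.map (fun x => x * x)) (fun x => x) false

-- ===== PRECONDITION & SPEC =====
-- a "valley": non-increasing then non-decreasing (squares of any sorted array are shaped like this)
def pvValley (q : List Int) : Prop :=
  ∃ j ∈ List.range (q.length + 1),
    (q.take j).Pairwise (· ≥ ·) ∧ (q.drop j).Pairwise (· ≤ ·)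
-- Pre_ excludes inputs whose element squares are not valley-shaped (in particular any unsorted
-- array whose square sequence has an interior strict peak): A's two-pointer merge is specified for
-- a sorted array (the problem's precondition), and outside the valley shape it returns an
-- accidental interleaving no caller would specify.
def Pre_sorted_squared2 (array : List Int) : Prop := pvValley (array.map (fun x => x * x))
instance (array : List Int) : Decidable (Pre_sorted_squared2 array) := by
  unfold Pre_sorted_squared2 pvValley; infer_instance
def pvWitness_sorted_squared2 : List Int := [-3, -1, 2]

def Spec_sorted_squared2 (array : List Int) (out : List Int) : Prop := out = sorted_squared2_alt array
instance (array : List Int) (out : List Int) : Decidable (Spec_sorted_squared2 array out) := by unfold Spec_sorted_squared2; infer_instance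

-- ===== CLAIM (what is proved, stated in full; the proofs are below) =====
def Claim_equal_sorted_squared2 : Prop := ∀ (array : List Int), Dom_sorted_squared2 array → Pre_sorted_squared2 array → Spec_sorted_squared2 array (sorted_squared2 array)

-- ===== LEMMAS AND PROOFS =====

-- appending a maximal element commutes with sorting
lemma pv_sorted_append_max (zs : List Int) (m : Int) (hm : ∀ z ∈ zs, z ≤ m) :
    PySem.List.sorted (zs ++ [m]) (fun x => x) false
      = PySem.List.sorted zs (fun x => x) false ++ [m] := by
  apply PySem.List.sorted_id_eq_of_perm_of_pairwise
  · exact (PySem.List.sorted_perm zs (fun x => x) false).append_right [m]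
  · rw [List.pairwise_append]
    refine ⟨PySem.List.sorted_pairwise zs (fun x => x), List.pairwise_singleton _ _, ?_⟩
    intro a ha b hb
    rw [List.mem_singleton] at hb
    subst hb
    exact hm a ((PySem.List.mem_sorted _ _ _ _).1 ha)

lemma pv_head_rel (R : Int → Int → Prop) (hrefl : ∀ a, R a a) (w : List Int) (hw : w ≠ [])
    (hp : w.Pairwise R) (x : Int) (hx : x ∈ w) : R (w.head hw) x := by
  cases w with
  | nil => exact absurd rfl hw
  | cons h t =>
    rcases List.mem_cons.1 hx with rfl | hx
    · exact hrefl _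
    · exact (List.pairwise_cons.1 hp).1 x hx

lemma pv_last_rel (R : Int → Int → Prop) (hrefl : ∀ a, R a a) (w : List Int) (hw : w ≠ [])
    (hp : w.Pairwise R) (x : Int) (hx : x ∈ w) : R x (w.getLast hw) := by
  rw [← List.dropLast_concat_getLast hw] at hp hx
  rcases List.mem_append.1 hx with hx | hx
  · exact (List.pairwise_append.1 hp).2.2 x hx _ (List.mem_singleton_self _)
  · rw [List.mem_singleton.1 hx]; exact hrefl _

lemma pv_valley_bound (q : List Int) (hq : pvValley q) (hne : q ≠ []) :
    ∀ x ∈ q, x ≤ max (q.head hne) (q.getLast hne) := by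
  obtain ⟨j, _, hdec, hinc⟩ := hq
  intro x hx
  rw [← List.take_append_drop j q] at hx
  rcases List.mem_append.1 hx with hx | hx
  · have htne : q.take j ≠ [] := List.ne_nil_of_mem hx
    have h1 := pv_head_rel (· ≥ ·) (fun a => le_refl a) _ htne hdec x hx
    rw [List.head_take htne] at h1
    exact le_max_of_le_left h1
  · have hdne : q.drop j ≠ [] := List.ne_nil_of_mem hx
    have h1 := pv_last_rel (· ≤ ·) (fun a => le_refl a) _ hdne hinc x hx
    rw [List.getLast_drop hdne] at h1
    exact le_max_of_le_right h1

lemma pv_valley_tail (q : List Int) (hq : pvValley q) : pvValley q.tail := by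
  obtain ⟨j, hj, hdec, hinc⟩ := hq
  rw [List.mem_range] at hj
  cases q with
  | nil => exact ⟨0, by simp, by simp, by simp⟩
  | cons a t =>
    cases j with
    | zero =>
      refine ⟨0, by simp, by simp, ?_⟩
      simpa using (List.pairwise_cons.1 (by simpa using hinc)).2
    | succ j' =>
      refine ⟨j', List.mem_range.2 (by simp at hj ⊢; omega), ?_, ?_⟩
      · rw [List.take_succ_cons] at hdec
        exact (List.pairwise_cons.1 hdec).2
      · simpa [List.drop_succ_cons] using hinc

lemma pv_valley_dropLast (q : List Int) (hq : pvValley q) : pvValley q.dropLast := by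
  obtain ⟨j, hj, hdec, hinc⟩ := hq
  rw [List.mem_range] at hj
  by_cases hcase : j ≤ q.length - 1
  · refine ⟨j, List.mem_range.2 (by simp [List.length_dropLast]; omega), ?_, ?_⟩
    · rw [List.dropLast_eq_take, List.take_take, Nat.min_eq_left hcase]
      exact hdec
    · rw [List.dropLast_eq_take, List.drop_take]
      exact hinc.sublist (List.take_sublist _ _)
  · have hall : q.Pairwise (· ≥ ·) := by
      have := List.take_of_length_le (show q.length ≤ j by omega)
      rwa [this] at hdec
    refine ⟨q.dropLast.length, List.mem_range.2 (by omega), ?_, ?_⟩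
    · rw [List.take_length]
      exact hall.sublist (List.dropLast_sublist q)
    · rw [List.drop_length]
      exact List.Pairwise.nil

lemma pv_inv (array : List Int) :
    ∀ (k l : Nat) (res : List Int),
      pvValley ((((array.drop l).take k)).map (fun x => x * x)) →
      l + k ≤ array.length →
      res.length = array.length →
      res.drop k = (sorted_squared2_alt array).drop k →
      PySem.List.sorted (((array.drop l).take k).map (fun x => x * x)) (fun x => x) false
        = (sorted_squared2_alt array).take k →
      (((List.range k).reverse).foldl (pvStepA array) ((l : Int), (l : Int) + (k : Int) - 1, res)).2.2
        = sorted_squared2_alt array := by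
  intro k
  induction k with
  | zero =>
    intro l res _ _ _ hres _
    simpa using hres
  | succ k ih =>
    intro l res hv hwin hlen hres hSk
    set S := sorted_squared2_alt array with hSdef
    have hSlen : S.length = array.length := by
      simp [hSdef, sorted_squared2_alt, PySem.List.length_sorted]
    have hl : l < array.length := by omega
    have hlk : l + k < array.length := by omega
    have hkS : k < S.length := by omega
    set w := (array.drop l).take (k + 1) with hwdef
    have hwlen : w.length = k + 1 := by
      simp [hwdef]; omega
    have hwne : w ≠ [] := by
      intro h; rw [h] at hwlen; simp at hwlen
    have hwqne : w.map (fun x => x * x) ≠ [] := by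
      simpa using hwne
    have hhead : w.head hwne = array[l] := by
      rw [List.head_eq_getElem]
      simp [hwdef, List.getElem_take]
    have hlast : w.getLast hwne = array[l + k] := by
      rw [List.getLast_eq_getElem]
      simp only [hwdef, List.getElem_take, List.getElem_drop]
      congr 1
      have : min (k + 1) (array.length - l) = k + 1 := by omega
      simp [this]
    -- every square in the window is bounded by the larger end square
    have hbound : ∀ x ∈ w, x * x ≤ max (array[l] * array[l]) (array[l + k] * array[l + k]) := by
      intro x hx
      have hb := pv_valley_bound _ hv hwqne (x * x) (List.mem_map_of_mem hx)
      rwa [List.head_map hwqne, List.getLast_map hwqne, hhead, hlast] at hb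
    -- the two reads A performs
    have hal : PySem.List.pyGetD array (l : Int) 0 = array[l] := by
      rw [PySem.List.pyGetD_natCast, List.getD_eq_getElem _ _ hl]
    have hridx : ((l : Int) + ((k : Nat) + 1 : Nat) - 1) = ((l + k : Nat) : Int) := by
      push_cast; ring
    have har : PySem.List.pyGetD array ((l : Int) + ((k : Nat) + 1 : Nat) - 1) 0 = array[l + k] := by
      rw [hridx, PySem.List.pyGetD_natCast, List.getD_eq_getElem _ _ hlk]
    -- peel the first iteration (index k)
    rw [List.range_succ, List.reverse_append]
    simp only [List.reverse_singleton, List.singleton_append, List.foldl_cons]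
    rw [show pvStepA array ((l : Int), (l : Int) + ((k : Nat) + 1 : Nat) - 1, res) k =
        (if array[l] ^ 2 > array[l + k] ^ 2 then
          ((l : Int) + 1, (l : Int) + ((k : Nat) + 1 : Nat) - 1, res.set k (array[l] ^ 2))
        else
          ((l : Int), (l : Int) + ((k : Nat) + 1 : Nat) - 1 - 1, res.set k (array[l + k] ^ 2)))
      from by simp only [pvStepA, hal, har]]
    by_cases hc : array[l] ^ 2 > array[l + k] ^ 2
    · -- larger square at the left end: remove the head of the window
      rw [if_pos hc]
      set m : Int := array[l] * array[l] with hmdef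
      have hmax : max (array[l] * array[l]) (array[l + k] * array[l + k]) = m := by
        apply max_eq_left
        have := le_of_lt hc
        rw [pow_two, pow_two] at this
        exact this
      set T := PySem.List.sorted (w.tail.map (fun x => x * x)) (fun x => x) false with hTdef
      have hTlen : T.length = k := by
        simp [hTdef, PySem.List.length_sorted, hwlen]
      have hE : S.take (k + 1) = T ++ [m] := by
        rw [← hSk]
        have hw1 : w.map (fun x => x * x) = m :: w.tail.map (fun x => x * x) := by
          conv_lhs => rw [← List.cons_head_tail hwne]
          simp [hhead, hmdef]
        have hperm : (w.tail.map (fun x => x * x) ++ [m]).Perm (w.map (fun x => x * x)) := by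
          rw [hw1]; exact List.perm_append_singleton _ _
        have hps := PySem.List.sorted_eq_sorted_of_perm
          (w.tail.map (fun x => x * x) ++ [m]) (w.map (fun x => x * x))
          (fun x => x) (fun a b h => h) hperm
        rw [← hps]
        apply pv_sorted_append_max
        intro z hz
        rcases List.mem_map.1 hz with ⟨x, hx, rfl⟩
        rw [← hmax]
        exact hbound x (List.mem_of_mem_tail hx)
      have hSk_eq : S[k] = m := by
        have h1 : S[k] = (S.take (k + 1))[k]'(by simp; omega) := (List.getElem_take).symm
        have h2 : (S.take (k + 1))[k]'(by simp; omega) = (T ++ [m])[k]'(by simp [hTlen]) := by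
          congr 1
        rw [h1, h2, List.getElem_append_right (by omega)]
        simp [hTlen]
      have htakeT : S.take k = T := by
        have h3 : S.take k = (S.take (k + 1)).take k := by
          rw [List.take_take]; congr 1; omega
        rw [h3, hE, List.take_left' hTlen]
      have htail : w.tail = (array.drop (l + 1)).take k := by
        rw [hwdef, ← List.drop_one, List.drop_take, List.drop_drop]
        norm_num [Nat.add_comm]
      have hstep := ih (l + 1) (res.set k (array[l] ^ 2))
        (by rw [← htail, List.map_tail]; exact pv_valley_tail _ hv)
        (by omega) (by simpa using hlen)
        (by
          rw [List.drop_set]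
          simp only [lt_self_iff_false, if_false, Nat.sub_self]
          rw [List.drop_eq_getElem_cons (show k < res.length by omega), List.set_cons_zero,
            List.drop_eq_getElem_cons hkS, hSk_eq, hres, pow_two])
        (by rw [← htail, ← hTdef, htakeT])
      have e1 : ((l : Int) + 1) = ((l + 1 : Nat) : Int) := by push_cast; ring
      have e2 : ((l : Int) + ((k : Nat) + 1 : Nat) - 1) = ((l + 1 : Nat) : Int) + (k : Int) - 1 := by
        push_cast; ring
      rw [e2, e1]
      exact hstep
    · -- larger (or equal) square at the right end: remove the last element of the window
      rw [if_neg hc]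
      set m : Int := array[l + k] * array[l + k] with hmdef
      have hmax : max (array[l] * array[l]) (array[l + k] * array[l + k]) = m := by
        apply max_eq_right
        have := not_lt.1 hc
        rw [pow_two, pow_two] at this
        exact this
      set T := PySem.List.sorted (w.dropLast.map (fun x => x * x)) (fun x => x) false with hTdef
      have hTlen : T.length = k := by
        simp [hTdef, PySem.List.length_sorted, hwlen]
      have hE : S.take (k + 1) = T ++ [m] := by
        rw [← hSk]
        have hw1 : w.map (fun x => x * x) = w.dropLast.map (fun x => x * x) ++ [m] := by
          conv_lhs => rw [← List.dropLast_concat_getLast hwne]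
          simp [hlast, hmdef]
        rw [hw1]
        apply pv_sorted_append_max
        intro z hz
        rcases List.mem_map.1 hz with ⟨x, hx, rfl⟩
        rw [← hmax]
        exact hbound x ((List.dropLast_sublist w).subset hx)
      have hSk_eq : S[k] = m := by
        have h1 : S[k] = (S.take (k + 1))[k]'(by simp; omega) := (List.getElem_take).symm
        have h2 : (S.take (k + 1))[k]'(by simp; omega) = (T ++ [m])[k]'(by simp [hTlen]) := by
          congr 1
        rw [h1, h2, List.getElem_append_right (by omega)]
        simp [hTlen]
      have htakeT : S.take k = T := by
        have h3 : S.take k = (S.take (k + 1)).take k := by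
          rw [List.take_take]; congr 1; omega
        rw [h3, hE, List.take_left' hTlen]
      have hdl : w.dropLast = (array.drop l).take k := by
        rw [hwdef, List.dropLast_eq_take, hwlen]
        simp [List.take_take]
      have hstep := ih l (res.set k (array[l + k] ^ 2))
        (by rw [← hdl, List.map_dropLast]; exact pv_valley_dropLast _ hv)
        (by omega) (by simpa using hlen)
        (by
          rw [List.drop_set]
          simp only [lt_self_iff_false, if_false, Nat.sub_self]
          rw [List.drop_eq_getElem_cons (show k < res.length by omega), List.set_cons_zero,
            List.drop_eq_getElem_cons hkS, hSk_eq, hres, pow_two])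
        (by rw [← hdl, ← hTdef, htakeT])
      have e2 : ((l : Int) + ((k : Nat) + 1 : Nat) - 1 - 1) = (l : Int) + (k : Int) - 1 := by
        push_cast; ring
      rw [e2]
      exact hstep

-- ===== VERDICT (by name: the statement is the Claim_ definition above) =====
theorem sorted_squared2_spec : Claim_equal_sorted_squared2 := by
  intro array _ hpre
  unfold Spec_sorted_squared2 sorted_squared2
  have h := pv_inv array array.length 0 (List.replicate array.length (0 : Int))
    (by simpa [Pre_sorted_squared2] using hpre)
    (by omega) (by simp)
    (by simp [PySem.List.length_sorted, sorted_squared2_alt])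
    (by simp [sorted_squared2_alt, List.take_of_length_le, PySem.List.length_sorted])
  simpa using h
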